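-- pv_equiv track=rewrite | github.com/RAKETOMET135/pygame-dom | pygame_dom/style_sheet.py | __unit_split
-- ===== SOURCE A (Python) =====
-- def __unit_split(string: str) -> list[str]:
--     final: list[str] = []
--
--     builded_word: str = ""
--     for letter in string:
--         if letter.isdigit():
--             if len(builded_word) > 0 and (builded_word[len(builded_word) - 1].isalpha() or builded_word[len(builded_word) - 1] == "%"):
--                 final.append(builded_word)
--
--                 builded_word = ""
--
--         builded_word += letter
--
--     if len(builded_word) > 0:
--         final.append(builded_word)
--
--     return final
-- ===== SOURCE B (Python) =====
-- def __unit_split(string: str) -> list[str]: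
--     # Build the groups back-to-front: walk the string in reverse, deciding for each
--     # character whether it ends a group (the next char starts a digit run after a
--     # letter/'%') or belongs to the front of the current first group.
--     groups: list[str] = []
--     for ch in reversed(string):
--         if groups and groups[0][0].isdigit() and (ch.isalpha() or ch == "%"):
--             groups.insert(0, ch)
--         elif groups:
--             groups[0] = ch + groups[0]
--         else:
--             groups = [ch]
--     return groups
-- ===== Notes on version B (the rewrite author's own statement) =====
-- stated objective: alternative
-- what changed: B builds the token list back-to-front in a single reverse pass, deciding per adjacent character pair (current char vs head of the first already-built group) whether to start a new group or prepend to it, instead of A's forward accumulator that flushes a building word when a digit follows a letter or percent sign.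
import Mathlib
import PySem

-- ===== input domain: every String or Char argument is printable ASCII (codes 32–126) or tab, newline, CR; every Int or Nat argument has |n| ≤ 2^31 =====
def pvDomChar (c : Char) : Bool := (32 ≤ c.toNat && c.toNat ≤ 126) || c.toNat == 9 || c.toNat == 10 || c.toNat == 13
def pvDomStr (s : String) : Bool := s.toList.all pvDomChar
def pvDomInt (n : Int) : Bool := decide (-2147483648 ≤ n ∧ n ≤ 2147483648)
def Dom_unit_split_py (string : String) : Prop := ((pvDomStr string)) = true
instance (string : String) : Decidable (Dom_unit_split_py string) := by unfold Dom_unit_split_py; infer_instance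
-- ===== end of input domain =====

-- B builds the same tokens back-to-front in one reverse pass (foldr) instead of A's forward flush-accumulator.

-- ===== PORT A =====
-- builded_word[len(builded_word)-1].isalpha() or builded_word[len(builded_word)-1] == "%"
def pvLastAlphaPct (bw : List Char) : Bool :=
  match PySem.List.pyGet? bw ((bw.length : Int) - 1) with
  | some l => PySem.Chars.isalpha l || l == '%'
  | none => false

-- the for-loop over string, state = (final, builded_word), as structural recursion
def pvLoopA : List (List Char) → List Char → List Char → List (List Char) × List Char
  | final, bw, [] => (final, bw)
  | final, bw, c :: rest =>
    let p := PySem.Chars.isdigit c && (decide (0 < bw.length) && pvLastAlphaPct bw)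
    pvLoopA (if p then final ++ [bw] else final) ((if p then [] else bw) ++ [c]) rest

def unit_split_py (string : String) : List String :=
  let st := pvLoopA [] [] string.toList
  (if 0 < st.2.length then st.1 ++ [st.2] else st.1).map (fun g => String.mk g)

-- ===== PORT B =====
-- one step of B's reverse loop: groups so far (each nonempty), next char to the left
def pvStepB (c : Char) (groups : List (List Char)) : List (List Char) :=
  match groups with
  | [] => [[c]]
  | g :: gs =>
    if (match g.head? with | some d => PySem.Chars.isdigit d | none => false)
        && (PySem.Chars.isalpha c || c == '%') then
      [c] :: g :: gs
    else
      (c :: g) :: gs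

def unit_split_py_alt (string : String) : List String :=
  (string.toList.foldr pvStepB []).map (fun g => String.mk g)

-- ===== PRECONDITION & SPEC =====
def Spec_unit_split_py (string : String) (out : List String) : Prop := out = unit_split_py_alt string
instance (string : String) (out : List String) : Decidable (Spec_unit_split_py string out) := by unfold Spec_unit_split_py; infer_instance

-- ===== CLAIM (what is proved, stated in full; the proofs are below) =====
def Claim_equal_unit_split_py : Prop := ∀ (string : String), Dom_unit_split_py string → Spec_unit_split_py string (unit_split_py string)

-- ===== LEMMAS AND PROOFS =====

-- split before c when the previous char l is a letter or '%' and c is a digit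
def pvBoundary (l c : Char) : Bool := PySem.Chars.isdigit c && (PySem.Chars.isalpha l || l == '%')

-- canonical forward grouping: current (nonempty) group `cur`, rest of the string
def pvGo (cur : List Char) : List Char -> List (List Char)
  | [] => [cur]
  | c :: rest => if pvBoundary (cur.getLastD ' ') c then cur :: pvGo [c] rest else pvGo (cur ++ [c]) rest

lemma pvGo_cons : forall (rest : List Char) (c : Char) (cur g : List Char) (gs : List (List Char)),
    cur ≠ [] -> pvGo cur rest = g :: gs -> pvGo (c :: cur) rest = (c :: g) :: gs := by
  intro rest
  induction rest with
  | nil =>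
    intro c cur g gs h hgo
    simp only [pvGo] at hgo
    injection hgo with h1 h2
    subst h1; subst h2
    rfl
  | cons y rest ih =>
    intro c cur g gs h hgo
    have hlast : (c :: cur).getLastD ' ' = cur.getLastD ' ' := by
      cases cur with
      | nil => exact absurd rfl h
      | cons a l => rfl
    simp only [pvGo, hlast] at hgo ⊢
    by_cases hb : pvBoundary (cur.getLastD ' ') y = true
    · rw [if_pos hb] at hgo ⊢
      injection hgo with h1 h2
      rw [h1, h2]
    · rw [if_neg hb] at hgo ⊢
      have := ih c (cur ++ [y]) g gs (by simp) hgo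
      simpa using this

lemma pvGo_head : forall (rest : List Char) (c : Char) (cur : List Char),
    ∃ g gs, pvGo (c :: cur) rest = (c :: g) :: gs := by
  intro rest
  induction rest with
  | nil => intro c cur; exact ⟨cur, [], rfl⟩
  | cons y rest ih =>
    intro c cur
    simp only [pvGo]
    by_cases hb : pvBoundary ((c :: cur).getLastD ' ') y = true
    · exact ⟨cur, pvGo [y] rest, by rw [if_pos hb]⟩
    · obtain ⟨g, gs, hg⟩ := ih c (cur ++ [y])
      refine ⟨g, gs, ?_⟩
      rw [if_neg hb]
      simpa using hg

lemma pvFoldr_eq_go : forall (l : List Char),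
    l.foldr pvStepB [] = (match l with | [] => [] | c :: rest => pvGo [c] rest) := by
  intro l
  induction l with
  | nil => rfl
  | cons c rest ih =>
    simp only [List.foldr_cons, ih]
    cases rest with
    | nil => rfl
    | cons x xs =>
      show pvStepB c (pvGo [x] xs) = pvGo [c] (x :: xs)
      obtain ⟨g, gs, hg⟩ := pvGo_head xs x []
      rw [hg]
      show pvStepB c ((x :: g) :: gs) = pvGo [c] (x :: xs)
      have hc : ([c] : List Char).getLastD ' ' = c := rfl
      simp only [pvStepB, pvGo, List.head?_cons, hc, pvBoundary]
      by_cases hb : (PySem.Chars.isdigit x && (PySem.Chars.isalpha c || c == '%')) = true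
      · rw [if_pos hb, if_pos hb, hg]
      · rw [if_neg hb, if_neg hb]
        have := pvGo_cons xs c [x] (x :: g) gs (by simp) hg
        simpa using this.symm

-- `if len > 0 then append builded_word` tail step after the loop
def pvFinishA (st : List (List Char) × List Char) : List (List Char) :=
  if 0 < st.2.length then st.1 ++ [st.2] else st.1

lemma pvLoopA_eq_go : forall (rest : List Char) (final : List (List Char)) (cur : List Char),
    cur ≠ [] -> pvFinishA (pvLoopA final cur rest) = final ++ pvGo cur rest := by
  intro rest
  induction rest with
  | nil =>
    intro final cur h
    simp [pvLoopA, pvFinishA, pvGo, List.length_pos_iff, h]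
  | cons c rest ih =>
    intro final cur h
    have hp : (PySem.Chars.isdigit c && (decide (0 < cur.length) && pvLastAlphaPct cur))
        = pvBoundary (cur.getLastD ' ') c := by
      have hlen : decide (0 < cur.length) = true := by
        simp [List.length_pos_iff, h]
      have hget : PySem.List.pyGet? cur ((cur.length : Int) - 1) = some (cur.getLastD ' ') := by
        have hl : 0 < cur.length := List.length_pos_iff.mpr h
        have : ((cur.length : Int) - 1) = ((cur.length - 1 : Nat) : Int) := by omega
        rw [this, PySem.List.pyGet?_natCast]
        rw [List.getElem?_eq_getElem (by omega)]
        congr 1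
        rw [List.getLastD_eq_getLast?, List.getLast?_eq_getElem?,
          List.getElem?_eq_getElem (by omega)]
        rfl
      simp [pvBoundary, pvLastAlphaPct, hget, hlen]
    simp only [pvLoopA, hp]
    by_cases hb : pvBoundary (cur.getLastD ' ') c = true
    · rw [if_pos hb, if_pos hb, List.nil_append]
      rw [ih (final ++ [cur]) [c] (by simp)]
      simp only [pvGo]
      rw [if_pos hb]
      simp
    · rw [if_neg hb, if_neg hb]
      rw [ih final (cur ++ [c]) (by simp)]
      simp only [pvGo]
      rw [if_neg hb]

lemma pvMain_list : forall (l : List Char),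
    pvFinishA (pvLoopA [] [] l) = (match l with | [] => [] | c :: rest => pvGo [c] rest) := by
  intro l
  cases l with
  | nil => rfl
  | cons c rest =>
    have h1 : pvLoopA [] [] (c :: rest) = pvLoopA [] [c] rest := by
      simp [pvLoopA]
    rw [h1, pvLoopA_eq_go rest [] [c] (by simp)]
    simp

-- ===== VERDICT (by name: the statement is the Claim_ definition above) =====
theorem unit_split_py_spec : Claim_equal_unit_split_py := by
  intro s _
  show unit_split_py s = unit_split_py_alt s
  unfold unit_split_py unit_split_py_alt
  rw [pvFoldr_eq_go]
  show (pvFinishA (pvLoopA [] [] s.toList)).map (fun g => String.mk g) = _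
  rw [pvMain_list]
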